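-- pv_equiv track=rewrite | github.com/EngPeterAtef/Writer_Agent | pages/4_🧾_Chat_with_your_data.py | count_words_with_bullet_points
-- ===== SOURCE A (Python) =====
-- def count_words_with_bullet_points(input_string):
--     bullet_points = [
--         "*",
--         "-",
--         "+",
--         ".",
--     ]  # define the bullet points to look for
--     words_count = 0
--     for bullet_point in bullet_points:
--         input_string = input_string.replace(
--             bullet_point, ""
--         )  # remove the bullet points
--     words_count = len(input_string.split())  # count the words
--     return words_count
-- ===== SOURCE B (Python) =====
-- def count_words_with_bullet_points(input_string):
--     words_count = 0
--     in_word = False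
--     for ch in input_string:
--         if ch.isspace():
--             in_word = False
--         elif ch in "*-+.":
--             pass  # bullet chars are deleted, so they are transparent (do not separate words)
--         elif not in_word:
--             words_count += 1
--             in_word = True
--     return words_count
-- ===== Notes on version B (the rewrite author's own statement) =====
-- stated objective: alternative
-- what changed: Replaced four whole-string replace passes plus split-and-count by a single-pass character state machine (count, in_word) that treats bullet chars as transparent and never builds a cleaned string.
import Mathlib
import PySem

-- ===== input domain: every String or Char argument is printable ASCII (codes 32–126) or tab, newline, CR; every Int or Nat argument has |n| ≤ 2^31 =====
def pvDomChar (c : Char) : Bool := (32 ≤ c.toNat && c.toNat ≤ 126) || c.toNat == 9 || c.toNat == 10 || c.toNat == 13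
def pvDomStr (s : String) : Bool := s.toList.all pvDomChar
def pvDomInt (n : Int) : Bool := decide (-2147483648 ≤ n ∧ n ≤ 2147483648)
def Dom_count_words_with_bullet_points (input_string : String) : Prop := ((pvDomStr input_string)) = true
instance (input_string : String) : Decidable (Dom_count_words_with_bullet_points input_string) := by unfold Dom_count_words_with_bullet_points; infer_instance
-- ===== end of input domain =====

-- B replaces A's four whole-string replace passes + split by a single-pass word-boundary
-- state machine that never builds a cleaned string (objective: alternative decomposition).

-- ===== PORT A =====
-- A: for each bullet char, input_string = input_string.replace(bp, ""); then len(input_string.split())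
def count_words_with_bullet_points (input_string : String) : Int :=
  let cleaned := ["*", "-", "+", "."].foldl
    (fun s bullet_point => PySem.Str.replace s bullet_point "") input_string
  ((PySem.Str.split₀ cleaned).length : Int)

-- ===== PORT B =====
-- one loop iteration of Source B: whitespace ends a word; a bullet char is transparent;
-- any other char starts a word when not already in one
def cwbpAltStep (st : Int × Bool) (ch : Char) : Int × Bool :=
  if PySem.Chars.isspace ch then (st.1, false)
  else if (['*','-','+','.'].contains ch) then st
  else if st.2 then st else (st.1 + 1, true)

def count_words_with_bullet_points_alt (input_string : String) : Int :=
  (input_string.toList.foldl cwbpAltStep (0, false)).1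

-- ===== PRECONDITION & SPEC =====
def Spec_count_words_with_bullet_points (input_string : String) (out : Int) : Prop := out = count_words_with_bullet_points_alt input_string
instance (input_string : String) (out : Int) : Decidable (Spec_count_words_with_bullet_points input_string out) := by unfold Spec_count_words_with_bullet_points; infer_instance

-- ===== CLAIM (what is proved, stated in full; the proofs are below) =====
def Claim_equal_count_words_with_bullet_points : Prop := ∀ (input_string : String), Dom_count_words_with_bullet_points input_string → Spec_count_words_with_bullet_points input_string (count_words_with_bullet_points input_string)

-- ===== LEMMAS AND PROOFS =====

-- proof-only: B's step once bullet chars have been filtered away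
def cwbpStep2 (st : Int × Bool) (ch : Char) : Int × Bool :=
  if PySem.Chars.isspace ch then (st.1, false)
  else if st.2 then st else (st.1 + 1, true)

def cwbpNonbullet (c : Char) : Bool := !(['*','-','+','.'].contains c)

-- replacing a single character by "" is filtering it out
theorem cwbp_replace_go_filter (b : Char) :
    ∀ (fuel : Nat) (l acc : List Char), l.length ≤ fuel →
      PySem.Chars.replace.go [b] [] fuel l acc = acc.reverse ++ l.filter (fun c => !(c == b)) := by
  intro fuel
  induction fuel with
  | zero =>
    intro l acc h
    have : l = [] := List.eq_nil_of_length_eq_zero (Nat.le_zero.mp h)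
    subst this
    simp [PySem.Chars.replace.go]
  | succ n ih =>
    intro l acc h
    cases l with
    | nil => simp [PySem.Chars.replace.go]
    | cons c t =>
      have ht : t.length ≤ n := by simpa using Nat.le_of_succ_le_succ h
      by_cases hb : b = c
      · subst hb
        have hgo : PySem.Chars.replace.go [b] [] (n + 1) (b :: t) acc
            = PySem.Chars.replace.go [b] [] n t acc := by
          simp [PySem.Chars.replace.go, List.isPrefixOf]
        rw [hgo, ih t acc ht, List.filter_cons]
        simp
      · have hcb : (c == b) = false := by simpa using Ne.symm hb
        have hgo : PySem.Chars.replace.go [b] [] (n + 1) (c :: t) acc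
            = PySem.Chars.replace.go [b] [] n t (c :: acc) := by
          have hbc : (b == c) = false := by simpa using hb
          simp [PySem.Chars.replace.go, List.isPrefixOf, hbc]
        rw [hgo, ih t (c :: acc) ht, List.filter_cons]
        simp [hcb]

theorem cwbp_replace_filter (cs : List Char) (b : Char) :
    PySem.Chars.replace cs [b] [] = cs.filter (fun c => !(c == b)) := by
  simpa using cwbp_replace_go_filter b cs.length cs [] le_rfl

-- the four successive filters are one filter by cwbpNonbullet
theorem cwbp_filter4 (cs : List Char) :
    ((((cs.filter (fun c => !(c == '*'))).filter (fun c => !(c == '-'))).filter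
        (fun c => !(c == '+'))).filter (fun c => !(c == '.'))) = cs.filter cwbpNonbullet := by
  simp only [List.filter_filter]
  apply List.filter_congr
  intro c _
  cases h1 : c == '*' <;> cases h2 : c == '-' <;> cases h3 : c == '+' <;> cases h4 : c == '.' <;>
    simp_all [cwbpNonbullet]

-- bullet chars are transparent to B's machine
theorem cwbp_foldl_filter (cs : List Char) :
    ∀ st : Int × Bool, cs.foldl cwbpAltStep st = (cs.filter cwbpNonbullet).foldl cwbpStep2 st := by
  induction cs with
  | nil => intro st; rfl
  | cons c t ih =>
    intro st
    by_cases hb : cwbpNonbullet c = true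
    · have hc : (['*','-','+','.'].contains c) = false := by
        simpa [cwbpNonbullet] using hb
      have hstep : cwbpAltStep st c = cwbpStep2 st c := by
        unfold cwbpAltStep cwbpStep2
        rw [hc]
        simp
      rw [List.foldl_cons, List.filter_cons]
      simp only [hb, if_pos, List.foldl_cons, hstep, ih]
    · have hbf : cwbpNonbullet c = false := by simpa using hb
      have hc : (['*','-','+','.'].contains c) = true := by
        unfold cwbpNonbullet at hbf
        cases hcc : (['*','-','+','.'].contains c) with
        | true => rfl
        | false => rw [hcc] at hbf; exact absurd hbf (by decide)
      have hmem : c ∈ ['*', '-', '+', '.'] := List.mem_of_elem_eq_true hc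
      have hstep : cwbpAltStep st c = st := by
        unfold cwbpAltStep
        fin_cases hmem <;> rw [if_neg (by decide), if_pos (by decide)]
      rw [List.foldl_cons, List.filter_cons, hstep, ih]
      simp [hbf]

-- the split-and-count of A equals B's machine, via an invariant on split₀'s accumulator
theorem cwbp_go_machine (cs : List Char) :
    ∀ (cur : List Char) (acc : List (List Char)),
      ((PySem.Chars.split₀.go cs cur acc).length : Int)
        = (cs.foldl cwbpStep2 ((acc.length : Int) + (if cur.isEmpty then 0 else 1), !cur.isEmpty)).1 := by
  induction cs with
  | nil =>
    intro cur acc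
    by_cases hc : cur.isEmpty <;> simp [PySem.Chars.split₀.go, hc]
  | cons c t ih =>
    intro cur acc
    by_cases hs : PySem.Chars.isspace c = true
    · by_cases hc : cur.isEmpty
      · rw [show PySem.Chars.split₀.go (c :: t) cur acc = PySem.Chars.split₀.go t [] acc by
          simp [PySem.Chars.split₀.go, hs, hc]]
        simp [List.foldl, cwbpStep2, hs, hc, ih]
      · rw [show PySem.Chars.split₀.go (c :: t) cur acc
            = PySem.Chars.split₀.go t [] (cur.reverse :: acc) by
          simp [PySem.Chars.split₀.go, hs, hc]]
        rw [ih [] (cur.reverse :: acc)]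
        simp [List.foldl, cwbpStep2, hs, hc]
    · rw [show PySem.Chars.split₀.go (c :: t) cur acc = PySem.Chars.split₀.go t (c :: cur) acc by
        simp [PySem.Chars.split₀.go, hs]]
      rw [ih (c :: cur) acc]
      by_cases hc : cur.isEmpty <;> simp [List.foldl, cwbpStep2, hs, hc]

-- ===== VERDICT (by name: the statement is the Claim_ definition above) =====
theorem count_words_with_bullet_points_spec : Claim_equal_count_words_with_bullet_points := by
  intro s _
  unfold Spec_count_words_with_bullet_points count_words_with_bullet_points
    count_words_with_bullet_points_alt
  simp only [List.foldl]
  have hlen : ∀ t : String, ((PySem.Str.split₀ t).length : Int)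
      = ((PySem.Chars.split₀ t.toList).length : Int) := by
    intro t
    rw [← PySem.Str.split₀_map_toList, List.length_map]
  rw [hlen]
  simp only [PySem.Str.toList_replace, String.toList_empty,
    show ("*" : String).toList = ['*'] by decide, show ("-" : String).toList = ['-'] by decide,
    show ("+" : String).toList = ['+'] by decide, show ("." : String).toList = ['.'] by decide,
    cwbp_replace_filter]
  rw [cwbp_filter4]
  rw [show PySem.Chars.split₀ (s.toList.filter cwbpNonbullet)
      = PySem.Chars.split₀.go (s.toList.filter cwbpNonbullet) [] [] from rfl]
  rw [cwbp_go_machine, cwbp_foldl_filter]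
  simp
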